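-- pv_equiv track=rewrite | github.com/melodist/CodingPractice | src/programmers/Babbling (2).py | solution
-- ===== SOURCE A (Python) =====
-- def solution(babbling):
--     words = ["aya", "ye", "woo", "ma"]
--     answer = 0
--
--     for b in babbling:
--         prev = ""
--         flag = False
--
--         while b:
--             flag = False
--             for w in words:
--                 if prev == w:
--                     continue
--
--                 len_w = len(w)
--                 if len(b) >= len_w and b[:len_w] == w:
--                     prev = w
--                     b = b[len_w:]
--                     flag = True
--                     break
--
--             if not flag:
--                 break
--
--         if len(b) == 0:
--             answer += 1
--
--     return answer
-- ===== SOURCE B (Python) =====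
-- def solution(babbling):
--     # Stage 1: doubled words can never occur in a valid babbling (the word set has
--     # pairwise-distinct first letters, so any doubled substring is an adjacent repeat);
--     # blank them out with a sentinel that matches no word.
--     # Stage 2: a stateless tokenizer then just checks "concatenation of words".
--     count = 0
--     for s in babbling:
--         for dup in ("ayaaya", "yeye", "woowoo", "mama"):
--             s = s.replace(dup, " ")
--         i, n = 0, len(s)
--         while i < n:
--             if s.startswith("aya", i):
--                 i += 3
--             elif s.startswith("ye", i):
--                 i += 2
--             elif s.startswith("woo", i):
--                 i += 3
--             elif s.startswith("ma", i):
--                 i += 2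
--             else:
--                 break
--         count += i == n
--     return count
-- ===== Notes on version B (the rewrite author's own statement) =====
-- stated objective: alternative
-- what changed: Replaces A's stateful greedy scanner (prev-word memory with continue/flag/break and repeated slicing) by two staged passes: first blank out the four doubled substrings 'ayaaya','yeye','woowoo','mama' with a sentinel space, then run a stateless tokenizer that only checks 'concatenation of words'; correct because the words have pairwise-distinct first letters, so any doubled substring in a word chain is a genuine adjacent repeat.
import Mathlib
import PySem

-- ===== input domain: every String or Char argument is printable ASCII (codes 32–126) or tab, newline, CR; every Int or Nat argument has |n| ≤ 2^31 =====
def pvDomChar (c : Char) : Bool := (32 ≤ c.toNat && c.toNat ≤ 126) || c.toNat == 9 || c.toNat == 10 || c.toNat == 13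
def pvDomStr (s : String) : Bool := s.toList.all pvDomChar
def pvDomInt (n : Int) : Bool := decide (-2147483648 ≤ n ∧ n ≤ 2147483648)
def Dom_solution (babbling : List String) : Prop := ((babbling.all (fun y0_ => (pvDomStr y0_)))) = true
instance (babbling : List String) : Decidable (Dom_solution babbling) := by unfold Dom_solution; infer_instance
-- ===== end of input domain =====

-- B replaces A's stateful greedy scanner (prev-word memory, continue/flag/break, repeated
-- slicing) by two staged passes: blank the doubled words with a sentinel space, then run a
-- stateless word tokenizer; same values on every input.

-- ===== PORT A =====
-- strings are handled as their List Char; b[:k] = take k, b[k:] = drop k (exact for k ≥ 0)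
def pvWords : List String := ["aya", "ye", "woo", "ma"]

-- the inner `for w in words` with its continue/break/flag: the word matched and the new b, if any
def tryWords : List String → String → List Char → Option (String × List Char)
  | [], _, _ => none
  | w :: ws, prev, b =>
    if prev = w then tryWords ws prev b
    else if w.length ≤ b.length ∧ b.take w.length = w.toList then
      some (w, b.drop w.length)
    else tryWords ws prev b

theorem tryWords_shrink : ∀ (ws : List String) (prev : String) (b : List Char)
    (w : String) (rest : List Char), (∀ u ∈ ws, u.length ≠ 0) →
    tryWords ws prev b = some (w, rest) → rest.length < b.length := by
  intro ws
  induction ws with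
  | nil => intro prev b w rest _ hsome; simp [tryWords] at hsome
  | cons u us ih =>
    intro prev b w rest hne h
    simp only [tryWords] at h
    split at h
    · exact ih prev b w rest (fun v hv => hne v (List.mem_cons_of_mem _ hv)) h
    · split at h
      · cases h
        have h0 : u.length ≠ 0 := hne u List.mem_cons_self
        simp only [List.length_drop]
        omega
      · exact ih prev b w rest (fun v hv => hne v (List.mem_cons_of_mem _ hv)) h

-- the `while b:` loop; returns the final value of b
def whileA (b : List Char) (prev : String) : List Char :=
  match h : tryWords pvWords prev b with
  | none => b
  | some (w, rest) => whileA rest w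
termination_by b.length
decreasing_by
  exact tryWords_shrink pvWords prev b w rest (by decide) h

def solution (babbling : List String) : Int :=
  babbling.foldl (fun answer b =>
    if (whileA b.toList "").length = 0 then answer + 1 else answer) 0

-- ===== PORT B =====
-- the four doubled words blanked out by Source B's first stage
def pvDoubles : List String := ["ayaaya", "yeye", "woowoo", "mama"]

-- `for dup in (...): s = s.replace(dup, " ")`
def scrub (s : List Char) : List Char :=
  pvDoubles.foldl (fun t d => PySem.Chars.replace t d.toList [' ']) s

-- the stateless `while i < n` tokenizer; returns the final i (s.startswith(w, i) for
-- 0 ≤ i ≤ n is exactly (s.drop i).take |w| = w's chars)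
def loopB (s : List Char) (n i : Nat) : Nat :=
  if i < n then
    if (s.drop i).take 3 = ['a', 'y', 'a'] then loopB s n (i + 3)
    else if (s.drop i).take 2 = ['y', 'e'] then loopB s n (i + 2)
    else if (s.drop i).take 3 = ['w', 'o', 'o'] then loopB s n (i + 3)
    else if (s.drop i).take 2 = ['m', 'a'] then loopB s n (i + 2)
    else i
  else i
termination_by n - i
decreasing_by all_goals omega

def solution_alt (babbling : List String) : Int :=
  babbling.foldl (fun count b =>
    let s := scrub b.toList
    if loopB s s.length 0 = s.length then count + 1 else count) 0

-- ===== PRECONDITION & SPEC =====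
def Spec_solution (babbling : List String) (out : Int) : Prop := out = solution_alt babbling
instance (babbling : List String) (out : Int) : Decidable (Spec_solution babbling out) := by unfold Spec_solution; infer_instance

-- ===== CLAIM =====
def Claim_equal_solution : Prop := ∀ (babbling : List String), Dom_solution babbling → Spec_solution babbling (solution babbling)

-- ===== LEMMAS AND PROOFS =====

-- the language of A's loop: chains of words with no immediate repeat after `prev`
inductive Chain : String → List Char → Prop
  | nil (p : String) : Chain p []
  | cons (p w : String) (rest : List Char) :
      w ∈ pvWords → w ≠ p → Chain w rest → Chain p (w.toList ++ rest)

-- the language of B's tokenizer: plain concatenations of words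
inductive WStar : List Char → Prop
  | nil : WStar []
  | cons (w : String) (rest : List Char) :
      w ∈ pvWords → WStar rest → WStar (w.toList ++ rest)

theorem take_one_of_take {b : List Char} {k : Nat} {l : List Char}
    (hk : 1 ≤ k) (h : b.take k = l) : b.take 1 = l.take 1 := by
  rw [← h, List.take_take, Nat.min_eq_left hk]

theorem excl {b : List Char} {k1 k2 : Nat} {l1 l2 : List Char} (hk1 : 1 ≤ k1) (hk2 : 1 ≤ k2)
    (h1 : b.take k1 = l1) (h2 : b.take k2 = l2) (hne : l1.take 1 ≠ l2.take 1) : False :=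
  hne ((take_one_of_take hk1 h1).symm.trans (take_one_of_take hk2 h2))

theorem len_of_take {b : List Char} {k : Nat} {l : List Char}
    (h : b.take k = l) (hl : l.length = k) : k ≤ b.length := by
  have := congrArg List.length h
  simp only [List.length_take] at this
  omega

theorem tryWords_nil (prev : String) : tryWords pvWords prev [] = none := by
  simp [tryWords, pvWords]

theorem whileA_eq (b : List Char) (prev : String) :
    whileA b prev = match tryWords pvWords prev b with
      | none => b
      | some (w, rest) => whileA rest w := by
  rw [whileA]
  split <;> simp_all

-- one step of A's while loop as a dispatch chain
theorem step (prev : String) (b : List Char) :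
    tryWords pvWords prev b =
      if prev ≠ "aya" ∧ b.take 3 = ['a', 'y', 'a'] then some ("aya", b.drop 3)
      else if prev ≠ "ye" ∧ b.take 2 = ['y', 'e'] then some ("ye", b.drop 2)
      else if prev ≠ "woo" ∧ b.take 3 = ['w', 'o', 'o'] then some ("woo", b.drop 3)
      else if prev ≠ "ma" ∧ b.take 2 = ['m', 'a'] then some ("ma", b.drop 2)
      else none := by
  have e1 : "aya".toList = ['a', 'y', 'a'] := rfl
  have f1 : "aya".length = 3 := rfl
  have f2 : "ye".length = 2 := rfl
  have f3 : "woo".length = 3 := rfl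
  have f4 : "ma".length = 2 := rfl
  have e2 : "ye".toList = ['y', 'e'] := rfl
  have e3 : "woo".toList = ['w', 'o', 'o'] := rfl
  have e4 : "ma".toList = ['m', 'a'] := rfl
  by_cases t1 : b.take 3 = ['a', 'y', 'a']
  · have l1 : 3 ≤ b.length := len_of_take t1 rfl
    have t2 : ¬ b.take 2 = ['y', 'e'] := fun h => excl (by omega) (by omega) t1 h (by decide)
    have t4 : ¬ b.take 2 = ['m', 'a'] := fun h => excl (by omega) (by omega) t1 h (by decide)
    by_cases p1 : prev = "aya" <;>
      simp [tryWords, pvWords, p1, t1, t2, t4, l1, e1, e2, e3, e4, f1, f2, f3, f4]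
  · by_cases t2 : b.take 2 = ['y', 'e']
    · have l2 : 2 ≤ b.length := len_of_take t2 rfl
      have t3 : ¬ b.take 3 = ['w', 'o', 'o'] := fun h => excl (by omega) (by omega) t2 h (by decide)
      have t4 : ¬ b.take 2 = ['m', 'a'] := fun h => excl (by omega) (by omega) t2 h (by decide)
      by_cases p2 : prev = "ye" <;>
        simp [tryWords, pvWords, p2, t1, t2, t3, l2, e1, e2, e3, e4, f1, f2, f3, f4]
    · by_cases t3 : b.take 3 = ['w', 'o', 'o']
      · have l3 : 3 ≤ b.length := len_of_take t3 rfl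
        have t4 : ¬ b.take 2 = ['m', 'a'] := fun h => excl (by omega) (by omega) t3 h (by decide)
        by_cases p3 : prev = "woo" <;>
          simp [tryWords, pvWords, p3, t2, t3, t4, l3, e1, e2, e3, e4, f1, f2, f3, f4]
      · by_cases t4 : b.take 2 = ['m', 'a']
        · have l4 : 2 ≤ b.length := len_of_take t4 rfl
          by_cases p4 : prev = "ma" <;>
            simp [tryWords, pvWords, p4, t1, t3, t4, l4, e1, e2, e3, e4, f1, f2, f3, f4]
        · simp [tryWords, pvWords, t1, t2, t3, t4, e1, e2, e3, e4, f1, f2, f3, f4]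

-- ## A's loop recognises exactly the Chain language

theorem whileA_to_chain : ∀ (n : Nat) (b : List Char) (prev : String), b.length ≤ n →
    (whileA b prev).length = 0 → Chain prev b := by
  intro n
  induction n with
  | zero =>
    intro b prev hn _
    have : b = [] := List.eq_nil_of_length_eq_zero (by omega)
    exact this ▸ Chain.nil prev
  | succ n ih =>
    intro b prev hn h
    rw [whileA_eq, step] at h
    split_ifs at h with c1 c2 c3 c4
    · have hb : b = "aya".toList ++ b.drop 3 := by
        conv_lhs => rw [← List.take_append_drop 3 b]
        rw [c1.2]; rfl
      have hl : 3 ≤ b.length := len_of_take c1.2 rfl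
      rw [hb]
      exact Chain.cons prev "aya" _ (by decide) (Ne.symm c1.1)
        (ih _ _ (by simp; omega) h)
    · have hb : b = "ye".toList ++ b.drop 2 := by
        conv_lhs => rw [← List.take_append_drop 2 b]
        rw [c2.2]; rfl
      have hl : 2 ≤ b.length := len_of_take c2.2 rfl
      rw [hb]
      exact Chain.cons prev "ye" _ (by decide) (Ne.symm c2.1)
        (ih _ _ (by simp; omega) h)
    · have hb : b = "woo".toList ++ b.drop 3 := by
        conv_lhs => rw [← List.take_append_drop 3 b]
        rw [c3.2]; rfl
      have hl : 3 ≤ b.length := len_of_take c3.2 rfl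
      rw [hb]
      exact Chain.cons prev "woo" _ (by decide) (Ne.symm c3.1)
        (ih _ _ (by simp; omega) h)
    · have hb : b = "ma".toList ++ b.drop 2 := by
        conv_lhs => rw [← List.take_append_drop 2 b]
        rw [c4.2]; rfl
      have hl : 2 ≤ b.length := len_of_take c4.2 rfl
      rw [hb]
      exact Chain.cons prev "ma" _ (by decide) (Ne.symm c4.1)
        (ih _ _ (by simp; omega) h)
    · have : b = [] := List.eq_nil_of_length_eq_zero h
      exact this ▸ Chain.nil prev

theorem mem_words {w : String} (hw : w ∈ pvWords) :
    w = "aya" ∨ w = "ye" ∨ w = "woo" ∨ w = "ma" := by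
  simpa [pvWords] using hw

theorem chain_to_whileA : ∀ (prev : String) (b : List Char), Chain prev b →
    whileA b prev = [] := by
  intro prev b h
  induction h with
  | nil p => rw [whileA_eq, tryWords_nil]
  | cons p w rest hw hne _ ih =>
    rw [whileA_eq, step]
    rcases mem_words hw with rfl | rfl | rfl | rfl
    · -- w = "aya"
      have e : ("aya" : String).toList ++ rest = 'a' :: 'y' :: 'a' :: rest := rfl
      rw [e]
      have t : List.take 3 ('a' :: 'y' :: 'a' :: rest) = ['a', 'y', 'a'] := rfl
      rw [if_pos ⟨Ne.symm hne, t⟩]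
      exact ih
    · -- w = "ye"
      have e : ("ye" : String).toList ++ rest = 'y' :: 'e' :: rest := rfl
      rw [e]
      have t : List.take 2 ('y' :: 'e' :: rest) = ['y', 'e'] := rfl
      have n1 : ¬ (List.take 3 ('y' :: 'e' :: rest) = ['a', 'y', 'a']) :=
        fun hx => excl (k1 := 3) (k2 := 2) (by omega) (by omega) hx t (by decide)
      rw [if_neg (fun hc => n1 hc.2), if_pos ⟨Ne.symm hne, t⟩]
      exact ih
    · -- w = "woo"
      have e : ("woo" : String).toList ++ rest = 'w' :: 'o' :: 'o' :: rest := rfl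
      rw [e]
      have t : List.take 3 ('w' :: 'o' :: 'o' :: rest) = ['w', 'o', 'o'] := rfl
      have n1 : ¬ (List.take 3 ('w' :: 'o' :: 'o' :: rest) = ['a', 'y', 'a']) :=
        fun hx => excl (k1 := 3) (k2 := 3) (by omega) (by omega) hx t (by decide)
      have n2 : ¬ (List.take 2 ('w' :: 'o' :: 'o' :: rest) = ['y', 'e']) :=
        fun hx => excl (k1 := 2) (k2 := 3) (by omega) (by omega) hx t (by decide)
      rw [if_neg (fun hc => n1 hc.2), if_neg (fun hc => n2 hc.2), if_pos ⟨Ne.symm hne, t⟩]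
      exact ih
    · -- w = "ma"
      have e : ("ma" : String).toList ++ rest = 'm' :: 'a' :: rest := rfl
      rw [e]
      have t : List.take 2 ('m' :: 'a' :: rest) = ['m', 'a'] := rfl
      have n1 : ¬ (List.take 3 ('m' :: 'a' :: rest) = ['a', 'y', 'a']) :=
        fun hx => excl (k1 := 3) (k2 := 2) (by omega) (by omega) hx t (by decide)
      have n2 : ¬ (List.take 2 ('m' :: 'a' :: rest) = ['y', 'e']) :=
        fun hx => excl (k1 := 2) (k2 := 2) (by omega) (by omega) hx t (by decide)
      have n3 : ¬ (List.take 3 ('m' :: 'a' :: rest) = ['w', 'o', 'o']) :=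
        fun hx => excl (k1 := 3) (k2 := 2) (by omega) (by omega) hx t (by decide)
      rw [if_neg (fun hc => n1 hc.2), if_neg (fun hc => n2 hc.2), if_neg (fun hc => n3 hc.2),
        if_pos ⟨Ne.symm hne, t⟩]
      exact ih

-- ## B's tokenizer recognises exactly the WStar language

theorem loopB_to_star : ∀ (m : Nat) (s : List Char) (i : Nat), s.length - i ≤ m → i ≤ s.length →
    loopB s s.length i = s.length → WStar (s.drop i) := by
  intro m
  induction m with
  | zero =>
    intro s i hm hi _
    have : s.drop i = [] := List.drop_eq_nil_of_le (by omega)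
    exact this ▸ WStar.nil
  | succ m ih =>
    intro s i hm hi h
    rw [loopB] at h
    by_cases hlt : i < s.length
    · rw [if_pos hlt] at h
      split_ifs at h with c1 c2 c3 c4
      · have hl : 3 ≤ (s.drop i).length := len_of_take c1 rfl
        have hs : s.drop i = "aya".toList ++ s.drop (i + 3) := by
          rw [← List.drop_drop]
          conv_lhs => rw [← List.take_append_drop 3 (s.drop i)]
          rw [c1]; rfl
        rw [hs]
        exact WStar.cons "aya" _ (by decide)
          (ih s (i + 3) (by simp at hl ⊢; omega) (by simp at hl; omega) h)
      · have hl : 2 ≤ (s.drop i).length := len_of_take c2 rfl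
        have hs : s.drop i = "ye".toList ++ s.drop (i + 2) := by
          rw [← List.drop_drop]
          conv_lhs => rw [← List.take_append_drop 2 (s.drop i)]
          rw [c2]; rfl
        rw [hs]
        exact WStar.cons "ye" _ (by decide)
          (ih s (i + 2) (by simp at hl ⊢; omega) (by simp at hl; omega) h)
      · have hl : 3 ≤ (s.drop i).length := len_of_take c3 rfl
        have hs : s.drop i = "woo".toList ++ s.drop (i + 3) := by
          rw [← List.drop_drop]
          conv_lhs => rw [← List.take_append_drop 3 (s.drop i)]
          rw [c3]; rfl
        rw [hs]
        exact WStar.cons "woo" _ (by decide)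
          (ih s (i + 3) (by simp at hl ⊢; omega) (by simp at hl; omega) h)
      · have hl : 2 ≤ (s.drop i).length := len_of_take c4 rfl
        have hs : s.drop i = "ma".toList ++ s.drop (i + 2) := by
          rw [← List.drop_drop]
          conv_lhs => rw [← List.take_append_drop 2 (s.drop i)]
          rw [c4]; rfl
        rw [hs]
        exact WStar.cons "ma" _ (by decide)
          (ih s (i + 2) (by simp at hl ⊢; omega) (by simp at hl; omega) h)
      · omega
    · have : s.drop i = [] := List.drop_eq_nil_of_le (by omega)
      exact this ▸ WStar.nil

theorem star_to_loopB : ∀ (m : Nat) (s : List Char) (i : Nat), s.length - i ≤ m → i ≤ s.length →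
    WStar (s.drop i) → loopB s s.length i = s.length := by
  intro m
  induction m with
  | zero =>
    intro s i hm hi _
    rw [loopB, if_neg (by omega)]
    omega
  | succ m ih =>
    intro s i hm hi hst
    by_cases hlt : i < s.length
    · have hne : s.drop i ≠ [] := by
        intro h
        have := congrArg List.length h
        simp at this; omega
      generalize heq : s.drop i = d at hst
      cases hst with
      | nil => exact absurd heq hne
      | cons w rest hw hrest =>
        rw [loopB, if_pos hlt]
        rcases mem_words hw with rfl | rfl | rfl | rfl
        · -- w = "aya"
          have t1 : (s.drop i).take 3 = ['a', 'y', 'a'] := by rw [heq]; rfl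
          have hr : rest = s.drop (i + 3) := by
            have : (s.drop i).drop 3 = rest := by rw [heq]; rfl
            rw [← this, List.drop_drop]
          have hl : 3 ≤ (s.drop i).length := len_of_take t1 rfl
          rw [if_pos t1]
          exact ih s (i + 3) (by simp at hl ⊢; omega) (by simp at hl; omega) (hr ▸ hrest)
        · -- w = "ye"
          have t1 : ¬ ((s.drop i).take 3 = ['a', 'y', 'a']) := by
            intro h
            have h0 : (s.drop i).take 2 = ['y', 'e'] := by rw [heq]; rfl
            exact excl (k1 := 3) (k2 := 2) (by omega) (by omega) h h0 (by decide)
          have t2 : (s.drop i).take 2 = ['y', 'e'] := by rw [heq]; rfl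
          have hr : rest = s.drop (i + 2) := by
            have : (s.drop i).drop 2 = rest := by rw [heq]; rfl
            rw [← this, List.drop_drop]
          have hl : 2 ≤ (s.drop i).length := len_of_take t2 rfl
          rw [if_neg t1, if_pos t2]
          exact ih s (i + 2) (by simp at hl ⊢; omega) (by simp at hl; omega) (hr ▸ hrest)
        · -- w = "woo"
          have t3 : (s.drop i).take 3 = ['w', 'o', 'o'] := by rw [heq]; rfl
          have t1 : ¬ ((s.drop i).take 3 = ['a', 'y', 'a']) := by
            intro h; exact excl (by omega) (by omega) h t3 (by decide)
          have t2 : ¬ ((s.drop i).take 2 = ['y', 'e']) := by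
            intro h; exact excl (by omega) (by omega) h t3 (by decide)
          have hr : rest = s.drop (i + 3) := by
            have : (s.drop i).drop 3 = rest := by rw [heq]; rfl
            rw [← this, List.drop_drop]
          have hl : 3 ≤ (s.drop i).length := len_of_take t3 rfl
          rw [if_neg t1, if_neg t2, if_pos t3]
          exact ih s (i + 3) (by simp at hl ⊢; omega) (by simp at hl; omega) (hr ▸ hrest)
        · -- w = "ma"
          have t4 : (s.drop i).take 2 = ['m', 'a'] := by rw [heq]; rfl
          have t1 : ¬ ((s.drop i).take 3 = ['a', 'y', 'a']) := by
            intro h; exact excl (by omega) (by omega) h t4 (by decide)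
          have t2 : ¬ ((s.drop i).take 2 = ['y', 'e']) := by
            intro h; exact excl (by omega) (by omega) h t4 (by decide)
          have t3 : ¬ ((s.drop i).take 3 = ['w', 'o', 'o']) := by
            intro h; exact excl (by omega) (by omega) h t4 (by decide)
          have hr : rest = s.drop (i + 2) := by
            have : (s.drop i).drop 2 = rest := by rw [heq]; rfl
            rw [← this, List.drop_drop]
          have hl : 2 ≤ (s.drop i).length := len_of_take t4 rfl
          rw [if_neg t1, if_neg t2, if_neg t3, if_pos t4]
          exact ih s (i + 2) (by simp at hl ⊢; omega) (by simp at hl; omega) (hr ▸ hrest)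
    · rw [loopB, if_neg hlt]; omega

-- ## Chain vs WStar and doubled words

theorem chain_to_star {p : String} {s : List Char} (h : Chain p s) : WStar s := by
  induction h with
  | nil => exact WStar.nil
  | cons p w rest hw _ _ ih => exact WStar.cons w rest hw ih

theorem star_no_space {s : List Char} (h : WStar s) : ¬ (' ' ∈ s) := by
  induction h with
  | nil => simp
  | cons w rest hw _ ih =>
    intro hm
    rcases List.mem_append.mp hm with hm | hm
    · rcases mem_words hw with rfl | rfl | rfl | rfl <;> simp_all
    · exact ih hm

-- the first two characters of a non-empty chain
theorem chain_take2 {p : String} {s : List Char} (h : Chain p s) (hne : s ≠ []) :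
    s.take 2 = ['a', 'y'] ∨ s.take 2 = ['y', 'e'] ∨ s.take 2 = ['w', 'o'] ∨ s.take 2 = ['m', 'a'] := by
  cases h with
  | nil => exact absurd rfl hne
  | cons p w rest hw _ _ =>
    rcases mem_words hw with rfl | rfl | rfl | rfl <;> exact (by simp)

-- no word of a chain can be a prefix of the remaining chain (the previous word was the same)
theorem chain_not_prefix {p : String} {rest : List Char} (h : Chain p rest) (hp : p ∈ pvWords) :
    ¬ (p.toList <+: rest) := by
  intro hpre
  cases h with
  | nil =>
    have hnil := List.eq_nil_of_prefix_nil hpre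
    rcases mem_words hp with rfl | rfl | rfl | rfl <;> exact absurd hnil (by decide)
  | cons _ w2 rest2 hw2 hne2 _ =>
    rcases mem_words hp with rfl | rfl | rfl | rfl <;>
      rcases mem_words hw2 with rfl | rfl | rfl | rfl <;>
        first
          | exact hne2 rfl
          | simp [List.cons_prefix_cons] at hpre

-- a chain never contains a doubled word as a substring
theorem chain_no_double : ∀ (p : String) (s : List Char), Chain p s →
    ∀ w ∈ pvWords, ∀ j, ¬ ((w.toList ++ w.toList) <+: s.drop j) := by
  intro p s h
  induction h with
  | nil =>
    intro w hw j hpre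
    rw [List.drop_nil] at hpre
    have hnil := List.eq_nil_of_prefix_nil hpre
    rcases mem_words hw with rfl | rfl | rfl | rfl <;> exact absurd hnil (by decide)
  | cons p w1 rest hw1 hne hch ih =>
    intro w hw j hpre
    by_cases hj : w1.toList.length ≤ j
    · rw [List.drop_append, List.drop_of_length_le hj, List.nil_append] at hpre
      exact ih w hw _ hpre
    · -- the occurrence starts inside w1
      rw [List.drop_append, Nat.sub_eq_zero_of_le (by omega), List.drop_zero] at hpre
      push Not at hj
      rcases mem_words hw1 with rfl | rfl | rfl | rfl
      · have hj' : j < 3 := by simpa using hj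
        interval_cases j <;> rcases mem_words hw with rfl | rfl | rfl | rfl <;>
          simp [List.cons_prefix_cons] at hpre <;>
          first
            | exact chain_not_prefix hch (by decide) hpre
            | (obtain ⟨t, rfl⟩ := hpre
               rcases chain_take2 hch (by simp) with h2 | h2 | h2 | h2 <;> simp at h2)
      · have hj' : j < 2 := by simpa using hj
        interval_cases j <;> rcases mem_words hw with rfl | rfl | rfl | rfl <;>
          simp [List.cons_prefix_cons] at hpre <;>
          exact chain_not_prefix hch (by decide) hpre
      · have hj' : j < 3 := by simpa using hj
        interval_cases j <;> rcases mem_words hw with rfl | rfl | rfl | rfl <;>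
          simp [List.cons_prefix_cons] at hpre <;>
          exact chain_not_prefix hch (by decide) hpre
      · have hj' : j < 2 := by simpa using hj
        interval_cases j <;> rcases mem_words hw with rfl | rfl | rfl | rfl <;>
          simp [List.cons_prefix_cons] at hpre <;>
          first
            | exact chain_not_prefix hch (by decide) hpre
            | (obtain ⟨t, rfl⟩ := hpre
               rcases chain_take2 hch (by simp) with h2 | h2 | h2 | h2 <;> simp at h2)

theorem star_to_chain : ∀ (s : List Char), WStar s →
    (∀ w ∈ pvWords, ∀ j, ¬ ((w.toList ++ w.toList) <+: s.drop j)) →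
    ∀ p, (p = "" ∨ (p ∈ pvWords ∧ ¬ (p.toList <+: s))) → Chain p s := by
  intro s hst
  induction hst with
  | nil => intro _ p _; exact Chain.nil p
  | cons w rest hw hrest ih =>
    intro hnd p hp
    have hwp : w ≠ p := by
      rcases hp with rfl | ⟨hpw, hnp⟩
      · rcases mem_words hw with rfl | rfl | rfl | rfl <;> decide
      · intro h; exact hnp (h ▸ List.prefix_append w.toList rest)
    have hnd' : ∀ u ∈ pvWords, ∀ j, ¬ ((u.toList ++ u.toList) <+: rest.drop j) := by
      intro u hu j hpre
      have := hnd u hu (w.toList.length + j)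
      rw [List.drop_append, List.drop_of_length_le (by omega), List.nil_append,
        Nat.add_sub_cancel_left] at this
      exact this hpre
    refine Chain.cons p w rest hw hwp (ih hnd' w (Or.inr ⟨hw, ?_⟩))
    intro hpr
    have := hnd w hw 0
    rw [List.drop_zero] at this
    obtain ⟨t, rfl⟩ := hpr
    exact this ⟨t, by simp⟩

-- ## the replacement stages

theorem go_mem_acc (old new : List Char) : ∀ (fuel : Nat) (l acc : List Char), ' ' ∈ acc →
    ' ' ∈ PySem.Chars.replace.go old new fuel l acc := by
  intro fuel
  induction fuel with
  | zero => intro l acc h; simp [PySem.Chars.replace.go, h]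
  | succ f ih =>
    intro l acc h
    cases l with
    | nil => simp [PySem.Chars.replace.go, h]
    | cons c t =>
      rw [PySem.Chars.replace.go]
      split
      · exact ih _ _ (by simp [h])
      · exact ih _ _ (by simp [h])

theorem go_id (old new : List Char) : ∀ (fuel : Nat) (l acc : List Char),
    (∀ j, ¬ (old <+: l.drop j)) → PySem.Chars.replace.go old new fuel l acc = acc.reverse ++ l := by
  intro fuel
  induction fuel with
  | zero => intro l acc _; simp [PySem.Chars.replace.go]
  | succ f ih =>
    intro l acc hno
    cases l with
    | nil => simp [PySem.Chars.replace.go]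
    | cons c t =>
      rw [PySem.Chars.replace.go]
      rw [if_neg (by
        intro hp
        exact hno 0 (by simpa using (List.isPrefixOf_iff_prefix.mp hp)))]
      rw [ih t (c :: acc) (fun j => by simpa using hno (j + 1))]
      simp

theorem go_space (old : List Char) (hold : old ≠ []) : ∀ (fuel : Nat) (l acc : List Char)
    (j : Nat), l.length ≤ fuel → old <+: l.drop j →
    ' ' ∈ PySem.Chars.replace.go old [' '] fuel l acc := by
  intro fuel
  induction fuel with
  | zero =>
    intro l acc j hf hp
    have : l = [] := List.eq_nil_of_length_eq_zero (by omega)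
    subst this
    rw [List.drop_nil] at hp
    exact absurd (List.eq_nil_of_prefix_nil hp) hold
  | succ f ih =>
    intro l acc j hf hp
    cases l with
    | nil =>
      rw [List.drop_nil] at hp
      exact absurd (List.eq_nil_of_prefix_nil hp) hold
    | cons c t =>
      rw [PySem.Chars.replace.go]
      split
      · exact go_mem_acc _ _ _ _ _ (by simp)
      · rename_i hnp
        cases j with
        | zero =>
          rw [List.drop_zero] at hp
          exact absurd (List.isPrefixOf_iff_prefix.mpr hp) (by simpa using hnp)
        | succ j =>
          exact ih t (c :: acc) j (by simpa using hf) (by simpa using hp)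

theorem rep_space_or_id (x old : List Char) (hold : old ≠ []) :
    PySem.Chars.replace x old [' '] = x ∨ ' ' ∈ PySem.Chars.replace x old [' '] := by
  by_cases hocc : ∃ j, old <+: x.drop j
  · right
    rw [PySem.Chars.replace, if_neg (by simpa [List.isEmpty_iff] using hold)]
    obtain ⟨j, hj⟩ := hocc
    exact go_space old hold x.length x [] j le_rfl hj
  · left
    rw [PySem.Chars.replace, if_neg (by simpa [List.isEmpty_iff] using hold)]
    push Not at hocc
    rw [go_id old [' '] x.length x [] hocc]
    rfl

theorem rep_no_occ_id (x old new : List Char) (hold : old ≠ [])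
    (hno : ∀ j, ¬ (old <+: x.drop j)) : PySem.Chars.replace x old new = x := by
  rw [PySem.Chars.replace, if_neg (by simpa [List.isEmpty_iff] using hold)]
  rw [go_id old new x.length x [] hno]
  rfl

theorem rep_unwind (x old : List Char) (hold : old ≠ [])
    (h : ¬ (' ' ∈ PySem.Chars.replace x old [' '])) :
    PySem.Chars.replace x old [' '] = x ∧ ∀ j, ¬ (old <+: x.drop j) := by
  rcases rep_space_or_id x old hold with hid | hsp
  · refine ⟨hid, fun j hj => ?_⟩
    rw [PySem.Chars.replace, if_neg (by simpa [List.isEmpty_iff] using hold)] at h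
    exact h (go_space old hold x.length x [] j le_rfl hj)
  · exact absurd hsp h

-- scrub written out over the four doubled words
theorem scrub_eq (b : List Char) :
    scrub b = PySem.Chars.replace (PySem.Chars.replace (PySem.Chars.replace
      (PySem.Chars.replace b "ayaaya".toList [' ']) "yeye".toList [' '])
      "woowoo".toList [' ']) "mama".toList [' '] := by
  rfl

theorem scrub_unwind (b : List Char) (h : ¬ (' ' ∈ scrub b)) :
    scrub b = b ∧ ∀ w ∈ pvWords, ∀ j, ¬ ((w.toList ++ w.toList) <+: b.drop j) := by
  rw [scrub_eq] at h ⊢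
  obtain ⟨e4, n4⟩ := rep_unwind _ _ (by decide) h
  rw [e4] at h ⊢
  obtain ⟨e3, n3⟩ := rep_unwind _ _ (by decide) h
  rw [e3] at h ⊢ n4
  obtain ⟨e2, n2⟩ := rep_unwind _ _ (by decide) h
  rw [e2] at h ⊢ n4 n3
  obtain ⟨e1, n1⟩ := rep_unwind _ _ (by decide) h
  rw [e1] at h ⊢ n4 n3 n2
  refine ⟨rfl, ?_⟩
  intro w hw j
  rcases mem_words hw with rfl | rfl | rfl | rfl
  · exact n1 j
  · exact n2 j
  · exact n3 j
  · exact n4 j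

theorem scrub_id (b : List Char)
    (hno : ∀ w ∈ pvWords, ∀ j, ¬ ((w.toList ++ w.toList) <+: b.drop j)) : scrub b = b := by
  rw [scrub_eq]
  rw [rep_no_occ_id b "ayaaya".toList [' '] (by decide) (fun j => hno "aya" (by decide) j)]
  rw [rep_no_occ_id b "yeye".toList [' '] (by decide) (fun j => hno "ye" (by decide) j)]
  rw [rep_no_occ_id b "woowoo".toList [' '] (by decide) (fun j => hno "woo" (by decide) j)]
  rw [rep_no_occ_id b "mama".toList [' '] (by decide) (fun j => hno "ma" (by decide) j)]

-- ## per-string equivalence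

theorem per_string (b : List Char) :
    ((whileA b "").length = 0) ↔ (loopB (scrub b) (scrub b).length 0 = (scrub b).length) := by
  constructor
  · intro h
    have hch : Chain "" b := whileA_to_chain b.length b "" le_rfl h
    have hno := chain_no_double "" b hch
    have hid : scrub b = b := scrub_id b hno
    rw [hid]
    exact star_to_loopB b.length b 0 (by omega) (by omega)
      (by rw [List.drop_zero]; exact chain_to_star hch)
  · intro h
    have hst : WStar (scrub b) := by
      have := loopB_to_star (scrub b).length (scrub b) 0 (by omega) (by omega) h
      rwa [List.drop_zero] at this
    have hsp : ¬ (' ' ∈ scrub b) := star_no_space hst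
    obtain ⟨hid, hno⟩ := scrub_unwind b hsp
    rw [hid] at hst
    have hch : Chain "" b := star_to_chain b hst hno "" (Or.inl rfl)
    exact (chain_to_whileA "" b hch) ▸ rfl

theorem fold_eq (l : List String) : ∀ acc : Int,
    l.foldl (fun answer b =>
      if (whileA b.toList "").length = 0 then answer + 1 else answer) acc
      = l.foldl (fun count b =>
          let s := scrub b.toList
          if loopB s s.length 0 = s.length then count + 1 else count) acc := by
  induction l with
  | nil => intro acc; rfl
  | cons x xs ih =>
    intro acc
    simp only [List.foldl_cons]
    by_cases h : (whileA x.toList "").length = 0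
    · rw [if_pos h, if_pos ((per_string x.toList).mp h), ih]
    · rw [if_neg h, if_neg (fun hh => h ((per_string x.toList).mpr hh)), ih]

-- ===== VERDICT =====
theorem solution_spec : Claim_equal_solution := by
  intro babbling _
  unfold Spec_solution solution solution_alt
  exact fold_eq babbling 0
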